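-- pv_equiv track=rewrite | github.com/MolfarUA/CodeWars_Solutions | 6 kyu/Last Survivors Ep.2/solution.py | last_survivors
-- ===== SOURCE A (Python) =====
-- def last_survivors(string):
--     str_list = []
--     the_str = string
--     str_list.append(string)
--     count = 0
--     while True:
--         first_count = 0
--         first_count_dict = {}
--         for char in the_str:
--             for the_char in the_str:
--                 if char == the_char:
--                     first_count = first_count + 1
--             first_count_dict[char] = first_count
--             first_count = 0
--         ############### defined the main dictionary ################
--         new_str = ""
--         for member in the_str:
--
--             if first_count_dict[member] <= 0:
--                 new_str = new_str + ""
--             elif first_count_dict[member] == 1: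
--                 new_str = new_str + member
--                 first_count_dict[member] = first_count_dict[member] - 1
--             elif first_count_dict[member] > 1:
--                 if member != 'z':
--                     new_str = new_str + chr(ord(member) + 1)
--                 elif member == 'z':
--                     new_str = new_str + chr(97)
--
--                 first_count_dict[member] = first_count_dict[member] - 2
--
--         the_str = new_str
--         count  = count +1
--         str_list.append(the_str)
--         if str_list[count] == str_list[count-1]:
--             break
--
--     return the_str
-- ===== SOURCE B (Python) =====
-- def last_survivors(string):
--     def transform(s):
--         positions = {}
--         for i, c in enumerate(s):
--             positions[c] = positions.get(c, []) + [i]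
--         kept = []
--         for c, idxs in positions.items():
--             n = len(idxs)
--             nxt = 'a' if c == 'z' else chr(ord(c) + 1)
--             for i in idxs[:n // 2]:
--                 kept.append((i, nxt))
--             if n % 2 == 1:
--                 kept.append((idxs[n // 2], c))
--         kept.sort(key=lambda t: t[0])
--         return "".join(c for _, c in kept)
--     s = string
--     while True:
--         new = transform(s)
--         if new == s:
--             return new
--         s = new
-- ===== Notes on version B (the rewrite author's own statement) =====
-- stated objective: faster
-- what changed: Each pass now groups occurrence indices per character into a dict of position lists, selects survivors in closed form per group (first n//2 positions get the next letter, one middle position keeps the char when n is odd) and reassembles the output by sorting the kept (index,char) pairs, replacing A's quadratic nested counting loops and mutating positional countdown scan; the str_list/count bookkeeping becomes a plain while-not-fixpoint loop.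
import Mathlib
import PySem

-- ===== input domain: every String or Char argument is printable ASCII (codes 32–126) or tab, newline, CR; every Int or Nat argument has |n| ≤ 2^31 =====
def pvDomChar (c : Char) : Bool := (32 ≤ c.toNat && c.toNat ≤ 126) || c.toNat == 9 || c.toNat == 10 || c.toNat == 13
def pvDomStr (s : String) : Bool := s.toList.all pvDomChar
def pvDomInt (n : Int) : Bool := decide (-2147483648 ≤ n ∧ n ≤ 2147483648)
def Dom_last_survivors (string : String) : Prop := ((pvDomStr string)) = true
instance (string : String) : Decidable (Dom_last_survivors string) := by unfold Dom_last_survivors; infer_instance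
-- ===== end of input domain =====

-- B replaces A's quadratic per-pass counting and mutating positional countdown by a per-character
-- grouping of occurrence indices, a closed-form survivor selection per group, and a sort of the
-- kept (index, char) pairs; measured asymptotically faster per pass in a timing run.
-- Both loops use fuel |s|+2, always enough: a non-fixpoint pass strictly shrinks the string.

-- ===== PORT A =====
-- A's per-pass emission step: dict lookup, countdown branches in Python's order
def pvA_step (st : PySem.Dict Char Int × String) (m : Char) : PySem.Dict Char Int × String :=
  let d := st.1
  let acc := st.2
  let v := d.getD m 0
  if v ≤ 0 then (d, acc)
  else if v == 1 then (d.insert m (v - 1), acc.push m)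
  else if v > 1 then
    (d.insert m (v - 2), acc.push (if m ≠ 'z' then Char.ofNat (m.toNat + 1) else Char.ofNat 97))
  else (d, acc)

-- A's nested counting loops building first_count_dict
def pvA_countDict (s : List Char) : PySem.Dict Char Int :=
  s.foldl (fun d ch =>
    d.insert ch (s.foldl (fun fc tc => if ch == tc then fc + 1 else fc) (0 : Int))) PySem.Dict.empty

def pvA_pass (s : List Char) : String :=
  (s.foldl pvA_step (pvA_countDict s, "")).2

def pvA_loop : Nat → String → String
  | 0, cur => cur
  | f + 1, cur =>
    let new := pvA_pass cur.toList
    if new == cur then new else pvA_loop f new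

def last_survivors (string : String) : String :=
  pvA_loop (string.toList.length + 2) string

-- ===== PORT B =====
-- Source B's next letter: 'a' for 'z', chr(ord(c)+1) otherwise
def pvB_next (c : Char) : Char := if c = 'z' then 'a' else Char.ofNat (c.toNat + 1)

-- positions[c] = positions.get(c, []) + [i], looping over enumerate(s)
def pvB_posStep (d : PySem.Dict Char (List Int)) (p : Int × Char) : PySem.Dict Char (List Int) :=
  d.insert p.2 (d.getD p.2 [] ++ [p.1])

def pvB_positions (s : List Char) : PySem.Dict Char (List Int) :=
  (PySem.List.enumerate s 0).foldl pvB_posStep PySem.Dict.empty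

-- body of Source B's 'for c, idxs in positions.items()' loop: the inner append loop over
-- idxs[:n//2] (a map over the slice) then the conditional middle append
def pvB_keptStep (acc : List (Int × Char)) (p : Char × List Int) : List (Int × Char) :=
  let n : Nat := p.2.length
  (acc ++ (PySem.List.slice p.2 none (some ((n / 2 : Nat) : Int))).map (fun i => (i, pvB_next p.1)))
    ++ (if n % 2 = 1 then [(PySem.List.pyGetD p.2 ((n / 2 : Nat) : Int) 0, p.1)] else [])

def pvB_pass (s : List Char) : String :=
  let kept := (pvB_positions s).items.foldl pvB_keptStep []
  String.ofList ((PySem.List.sorted kept (fun t => t.1) false).map (fun t => t.2))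

def pvB_loop : Nat → String → String
  | 0, cur => cur
  | f + 1, cur =>
    let new := pvB_pass cur.toList
    if new == cur then new else pvB_loop f new

def last_survivors_alt (string : String) : String :=
  pvB_loop (string.toList.length + 2) string

-- ===== PRECONDITION & SPEC =====
def Spec_last_survivors (string : String) (out : String) : Prop := out = last_survivors_alt string
instance (string : String) (out : String) : Decidable (Spec_last_survivors string out) := by unfold Spec_last_survivors; infer_instance

-- ===== CLAIM (what is proved, stated in full; the proofs are below) =====
def Claim_equal_last_survivors : Prop := ∀ (string : String), Dom_last_survivors string → Spec_last_survivors string (last_survivors string)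

-- ===== LEMMAS AND PROOFS =====

-- ---- A side: A's countdown pass equals a positional threshold scan (pvT) ----

-- proof-side midpoint: positional scan with a seen dict and threshold counts[c] - 2*seen[c]
def pvT_step (counts : PySem.Dict Char Int) (st : PySem.Dict Char Int × List Char) (c : Char) :
    PySem.Dict Char Int × List Char :=
  let seen := st.1
  let out := st.2
  let j := seen.getD c 0
  let seen' := seen.insert c (j + 1)
  let rem := counts.getD c 0 - 2 * j
  if rem > 1 then (seen', out ++ [pvB_next c])
  else if rem == 1 then (seen', out ++ [c])
  else (seen', out)

lemma getD_foldl_insert_const (l : List Char) (f : Char → Int) (d : PySem.Dict Char Int) (c : Char) :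
    (l.foldl (fun d ch => d.insert ch (f ch)) d).getD c 0 =
      if c ∈ l then f c else d.getD c 0 := by
  induction l generalizing d with
  | nil => simp
  | cons a l ih =>
    simp only [List.foldl_cons, ih, PySem.Dict.getD_insert, List.mem_cons]
    by_cases h1 : c ∈ l <;> by_cases h2 : c = a <;> simp [h1, h2]

lemma countDict_getD (s : List Char) (c : Char) :
    (pvA_countDict s).getD c 0 = (s.count c : Int) := by
  unfold pvA_countDict
  have hinner : ∀ ch : Char, s.foldl (fun fc tc => if ch == tc then fc + 1 else fc) (0 : Int)
      = (s.count ch : Int) := by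
    intro ch
    have : (fun (fc : Int) (tc : Char) => if ch == tc then fc + 1 else fc)
        = fun fc tc => if tc == ch then fc + 1 else fc := by
      funext fc tc
      by_cases h : ch = tc
      · simp [h]
      · have h2 : ¬ tc = ch := fun e => h e.symm
        simp [h, h2]
    rw [this, PySem.List.foldl_beq_add_one]; simp
  simp only [hinner]
  rw [getD_foldl_insert_const s (fun ch => (s.count ch : Int)) PySem.Dict.empty c]
  by_cases h : c ∈ s
  · simp [h]
  · simp [h, List.count_eq_zero.mpr h]

lemma push_mk (l : List Char) (c : Char) : (String.ofList l).push c = String.ofList (l ++ [c]) := by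
  rw [String.push_eq_append, String.singleton_eq_ofList, ← String.ofList_append]

-- A's countdown fold and the threshold fold agree under the invariant
-- dA[c] = max (counts[c] - 2*seen[c]) 0
lemma pass_fold_eq (counts : PySem.Dict Char Int) :
    ∀ (r : List Char) (dA seen : PySem.Dict Char Int) (accB : List Char),
      (∀ c, dA.getD c 0 = max (counts.getD c 0 - 2 * seen.getD c 0) 0) →
      (r.foldl pvA_step (dA, String.ofList accB)).2 =
        String.ofList (r.foldl (pvT_step counts) (seen, accB)).2 := by
  intro r
  induction r with
  | nil => intro dA seen accB _; rfl
  | cons c r ih =>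
    intro dA seen accB hinv
    have hc := hinv c
    simp only [List.foldl_cons]
    set n := counts.getD c 0 with hn
    set j := seen.getD c 0 with hj
    have hstepenv : ∀ c', (seen.insert c (j + 1)).getD c' 0 =
        if c' = c then j + 1 else seen.getD c' 0 := by
      intro c'; rw [PySem.Dict.getD_insert]
    by_cases h0 : dA.getD c 0 ≤ 0
    · have hA : pvA_step (dA, String.ofList accB) c = (dA, String.ofList accB) := by
        simp [pvA_step, h0]
      have hB : pvT_step counts (seen, accB) c = (seen.insert c (j + 1), accB) := by
        simp only [pvT_step]
        have h1 : ¬ (n - 2 * j > 1) := by omega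
        have h2 : ¬ ((n - 2 * j) == 1) = true := by simp; omega
        simp [← hn, ← hj, h1, h2]
      rw [hA, hB, ih]
      intro c'
      rw [hstepenv c']
      by_cases hcc : c' = c
      · subst hcc; simp only [if_true]; rw [hc] at h0 ⊢; omega
      · simp [hcc, hinv c']
    · by_cases h1 : dA.getD c 0 = 1
      · have hrem : n - 2 * j = 1 := by omega
        have hA : pvA_step (dA, String.ofList accB) c
            = (dA.insert c (dA.getD c 0 - 1), String.ofList (accB ++ [c])) := by
          simp [pvA_step, h1, push_mk]
        have hB : pvT_step counts (seen, accB) c = (seen.insert c (j + 1), accB ++ [c]) := by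
          simp only [pvT_step]
          have hg1 : ¬ (n - 2 * j > 1) := by omega
          simp [← hn, ← hj, hrem]
        rw [hA, hB, ih]
        intro c'
        rw [PySem.Dict.getD_insert, hstepenv c']
        by_cases hcc : c' = c
        · subst hcc; simp only [if_true]; rw [h1, hc] at *; omega
        · simp [hcc, hinv c']
      · have hv2 : dA.getD c 0 > 1 := by omega
        have hrem : n - 2 * j > 1 := by omega
        have hchar : (if c ≠ 'z' then Char.ofNat (c.toNat + 1) else Char.ofNat 97) = pvB_next c := by
          by_cases hz : c = 'z' <;> simp [hz, pvB_next]
        have hA : pvA_step (dA, String.ofList accB) c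
            = (dA.insert c (dA.getD c 0 - 2), String.ofList (accB ++ [pvB_next c])) := by
          simp only [pvA_step]
          rw [if_neg (by omega), if_neg (by simp; omega), if_pos hv2, hchar, push_mk]
        have hB : pvT_step counts (seen, accB) c
            = (seen.insert c (j + 1), accB ++ [pvB_next c]) := by
          simp only [pvT_step]
          simp [← hn, ← hj, hrem]
        rw [hA, hB, ih]
        intro c'
        rw [PySem.Dict.getD_insert, hstepenv c']
        by_cases hcc : c' = c
        · subst hcc; simp only [if_true]; rw [hc] at hv2 ⊢; omega
        · simp [hcc, hinv c']

-- ---- the per-position emission spec shared by both directions ----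

def pvEmit (s : List Char) (p : Int × Char) : Option Char :=
  if 2 * ((s.take p.1.toNat).count p.2) + 1 < s.count p.2 then some (pvB_next p.2)
  else if s.count p.2 = 2 * ((s.take p.1.toNat).count p.2) + 1 then some p.2
  else none

def pvF (s : List Char) (p : Int × Char) : Option (Int × Char) :=
  (pvEmit s p).map (fun ch => (p.1, ch))

def pvSpecKept (s : List Char) : List (Int × Char) :=
  (PySem.List.enumerate s 0).filterMap (pvF s)

-- the threshold scan is the positional filterMap of pvEmit
lemma thresh_eq_filterMap (s : List Char) :
    ∀ (t pre : List Char) (seen : PySem.Dict Char Int) (acc : List Char),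
      s = pre ++ t →
      (∀ c, seen.getD c 0 = (pre.count c : Int)) →
      (t.foldl (pvT_step (pvA_countDict s)) (seen, acc)).2
        = acc ++ (PySem.List.enumerate t (pre.length : Int)).filterMap (pvEmit s) := by
  intro t
  induction t with
  | nil =>
    intro pre seen acc _ _
    simp [PySem.List.enumerate_nil]
  | cons a t ih =>
    intro pre seen acc hs hinv
    subst hs
    rw [List.foldl_cons, PySem.List.enumerate_cons]
    have hj : seen.getD a 0 = (pre.count a : Int) := hinv a
    have hcount : (pvA_countDict (pre ++ a :: t)).getD a 0
        = ((pre ++ a :: t).count a : Int) := countDict_getD _ a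
    have hemit : pvEmit (pre ++ a :: t) ((pre.length : Int), a)
        = (if 2 * pre.count a + 1 < (pre ++ a :: t).count a then some (pvB_next a)
           else if (pre ++ a :: t).count a = 2 * pre.count a + 1 then some a else none) := by
      simp only [pvEmit, Int.toNat_natCast, List.take_left]
    have hinv' : ∀ c, (seen.insert a (seen.getD a 0 + 1)).getD c 0
        = (((pre ++ [a]).count c : Nat) : Int) := by
      intro c
      rw [PySem.Dict.getD_insert]
      by_cases hc : c = a
      · subst hc
        rw [if_pos rfl, hj]
        push_cast [List.count_append]
        simp
      · rw [if_neg hc, hinv c]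
        have : ¬ (a == c) = true := by simp; exact fun e => hc e.symm
        push_cast [List.count_append, List.count_singleton]
        simp [this]
    have hpre1 : ((pre.length : Int) + 1) = (((pre ++ [a]).length : Nat) : Int) := by
      push_cast [List.length_append, List.length_singleton]
      ring
    have hseq : pre ++ a :: t = (pre ++ [a]) ++ t := by simp
    by_cases h1 : 2 * pre.count a + 1 < (pre ++ a :: t).count a
    · have hemit' : pvEmit (pre ++ a :: t) ((pre.length : Int), a) = some (pvB_next a) := by
        rw [hemit, if_pos h1]
      have hstep : pvT_step (pvA_countDict (pre ++ a :: t)) (seen, acc) a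
          = (seen.insert a (seen.getD a 0 + 1), acc ++ [pvB_next a]) := by
        simp only [pvT_step]
        rw [hcount, hj, if_pos (by omega)]
      rw [hstep, ih (pre ++ [a]) _ _ hseq hinv', List.filterMap_cons_some hemit', hpre1]
      simp
    · by_cases h2 : (pre ++ a :: t).count a = 2 * pre.count a + 1
      · have hemit' : pvEmit (pre ++ a :: t) ((pre.length : Int), a) = some a := by
          rw [hemit, if_neg h1, if_pos h2]
        have hstep : pvT_step (pvA_countDict (pre ++ a :: t)) (seen, acc) a
            = (seen.insert a (seen.getD a 0 + 1), acc ++ [a]) := by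
          simp only [pvT_step]
          rw [hcount, hj, if_neg (by omega)]
          rw [if_pos (by simp only [beq_iff_eq]; omega)]
        rw [hstep, ih (pre ++ [a]) _ _ hseq hinv', List.filterMap_cons_some hemit', hpre1]
        simp
      · have hemit' : pvEmit (pre ++ a :: t) ((pre.length : Int), a) = none := by
          rw [hemit, if_neg h1, if_neg h2]
        have hstep : pvT_step (pvA_countDict (pre ++ a :: t)) (seen, acc) a
            = (seen.insert a (seen.getD a 0 + 1), acc) := by
          simp only [pvT_step]
          rw [hcount, hj, if_neg (by omega)]
          rw [if_neg (by simp only [beq_iff_eq]; omega)]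
        rw [hstep, ih (pre ++ [a]) _ _ hseq hinv', List.filterMap_cons_none hemit', hpre1]

-- ---- B side: positions dict characterization ----

def pvPosList (s : List Char) (c : Char) : List Int :=
  ((PySem.List.enumerate s 0).filter (fun p => p.2 == c)).map (·.1)

lemma keys_insert' (d : PySem.Dict Char (List Int)) (k : Char) (v : List Int) :
    (d.insert k v).keys = if d.contains k then d.keys else d.keys ++ [k] := by
  by_cases h : d.contains k
  · simp only [PySem.Dict.keys, PySem.Dict.items_insert_of_contains d v h, h, if_true, List.map_map]
    apply List.map_congr_left; intro p _
    by_cases hp : p.1 == k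
    · simp only [Function.comp, hp, if_true]; exact (LawfulBEq.eq_of_beq hp).symm
    · simp [Function.comp, hp]
  · simp [PySem.Dict.keys, PySem.Dict.items_insert_of_not_contains d v (by simpa using h), h]

lemma step_keys (d : PySem.Dict Char (List Int)) (p : Int × Char) :
    (pvB_posStep d p).keys = PySem.Set.add d.keys p.2 := by
  rw [pvB_posStep, keys_insert']
  have hb : d.contains p.2 = PySem.Set.contains d.keys p.2 := by
    simp [PySem.Dict.contains_eq_decide_mem_keys, PySem.Set.contains]
  rw [hb, PySem.Set.add]

lemma pos_keys_fold (l : List (Int × Char)) :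
    ∀ (d : PySem.Dict Char (List Int)),
      (l.foldl pvB_posStep d).keys = (l.map (·.2)).foldl PySem.Set.add d.keys := by
  induction l with
  | nil => intro d; rfl
  | cons p l ih =>
    intro d
    simp only [List.foldl_cons, List.map_cons, ih, step_keys]

lemma pos_keys (s : List Char) : (pvB_positions s).keys = PySem.Set.ofList s := by
  rw [pvB_positions, pos_keys_fold, PySem.List.map_snd_enumerate, PySem.Set.ofList_eq_foldl]
  simp [PySem.Dict.keys_empty]

lemma pos_getD (l : List (Int × Char)) :
    ∀ (d : PySem.Dict Char (List Int)) (c : Char),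
      (l.foldl pvB_posStep d).getD c [] =
        d.getD c [] ++ (l.filter (fun p => p.2 == c)).map (·.1) := by
  induction l with
  | nil => intro d c; simp
  | cons p l ih =>
    intro d c
    simp only [List.foldl_cons, ih, List.filter_cons]
    by_cases h : p.2 = c
    · subst h
      simp [pvB_posStep]
    · have h' : (p.2 == c) = false := by simp [h]
      have h2 : ¬ c = p.2 := fun e => h e.symm
      simp only [pvB_posStep, PySem.Dict.getD_insert, if_neg h2, h', Bool.false_eq_true, if_false]

lemma pos_items (s : List Char) :
    (pvB_positions s).items = (PySem.Set.ofList s).map (fun c => (c, pvPosList s c)) := by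
  have hnd : (pvB_positions s).keys.Nodup := by
    rw [pos_keys]; exact PySem.Set.nodup_ofList s
  rw [PySem.Dict.items_eq_map_keys (pvB_positions s) hnd [], pos_keys]
  apply List.map_congr_left
  intro c _
  rw [pvB_positions, pos_getD]
  simp [pvPosList]

-- ---- B side: the per-group closed-form selection as an occurrence scan ----

def pvSelRaw (p : Char × List Int) : List (Int × Char) :=
  (PySem.List.slice p.2 none (some ((p.2.length / 2 : Nat) : Int))).map (fun i => (i, pvB_next p.1)) ++
    (if p.2.length % 2 = 1 then [(PySem.List.pyGetD p.2 ((p.2.length / 2 : Nat) : Int) 0, p.1)] else [])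

def pvSelFrom (c : Char) (n : Nat) : Nat → List Int → List (Int × Char)
  | _, [] => []
  | j, i :: rest =>
    (if 2 * j + 1 < n then [(i, pvB_next c)] else if n = 2 * j + 1 then [(i, c)] else [])
      ++ pvSelFrom c n (j + 1) rest

lemma selFrom_nil_of_le (c : Char) (n : Nat) :
    ∀ (idxs : List Int) (j : Nat), n ≤ 2 * j → pvSelFrom c n j idxs = [] := by
  intro idxs
  induction idxs with
  | nil => intro j _; rfl
  | cons i rest ih =>
    intro j hj
    rw [pvSelFrom, if_neg (by omega), if_neg (by omega), ih (j + 1) (by omega)]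
    rfl

lemma selFrom_closed (c : Char) (n : Nat) :
    ∀ (idxs : List Int) (j : Nat), idxs.length + j = n →
      pvSelFrom c n j idxs =
        (idxs.take (n / 2 - j)).map (fun i => (i, pvB_next c)) ++
          (if n % 2 = 1 ∧ j ≤ n / 2 then [(PySem.List.pyGetD idxs ((n / 2 - j : Nat) : Int) 0, c)] else []) := by
  intro idxs
  induction idxs with
  | nil =>
    intro j h
    have hj : j = n := by simpa using h
    subst hj
    rw [List.take_nil, List.map_nil, List.nil_append, if_neg (by omega)]
    rfl
  | cons i rest ih =>
    intro j h
    rw [pvSelFrom]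
    by_cases h1 : 2 * j + 1 < n
    · rw [if_pos h1, ih (j + 1) (by simp at h ⊢; omega)]
      have ht : n / 2 - j = (n / 2 - (j + 1)) + 1 := by omega
      rw [ht, List.take_succ_cons, List.map_cons]
      have hget : PySem.List.pyGetD (i :: rest) (((n / 2 - (j + 1)) + 1 : Nat) : Int) 0
          = PySem.List.pyGetD rest ((n / 2 - (j + 1) : Nat) : Int) 0 := by
        rw [PySem.List.pyGetD_natCast, PySem.List.pyGetD_natCast, List.getD_cons_succ]
      by_cases hodd : n % 2 = 1
      · rw [if_pos ⟨hodd, by omega⟩, if_pos ⟨hodd, by omega⟩, hget]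
        simp
      · rw [if_neg (by omega), if_neg (by omega)]
        simp
    · by_cases h2 : n = 2 * j + 1
      · rw [if_neg h1, if_pos h2, selFrom_nil_of_le c n rest (j + 1) (by omega)]
        have hj2 : n / 2 - j = 0 := by omega
        rw [hj2, List.take_zero, List.map_nil, List.nil_append,
          if_pos ⟨by omega, by omega⟩]
        have : ((0 : Nat) : Int) = 0 := rfl
        rw [this, PySem.List.pyGetD_zero_cons]
        rfl
      · rw [if_neg h1, if_neg h2, selFrom_nil_of_le c n rest (j + 1) (by omega)]
        have hj2 : n / 2 - j = 0 := by omega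
        rw [hj2, List.take_zero, List.map_nil, List.nil_append, if_neg (by omega)]
        rfl

lemma selRaw_eq_selFrom (c : Char) (idxs : List Int) :
    pvSelRaw (c, idxs) = pvSelFrom c idxs.length 0 idxs := by
  rw [selFrom_closed c idxs.length idxs 0 (by omega), pvSelRaw,
    PySem.List.slice_to_natCast]
  simp [List.map_take]

-- per character, the filterMap of pvF over c's occurrences is the occurrence scan
lemma filter_filterMap_eq_selFrom (c : Char) :
    ∀ (t pre : List Char),
      ((PySem.List.enumerate t (pre.length : Int)).filter (fun p => p.2 == c)).filterMap (pvF (pre ++ t))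
        = pvSelFrom c ((pre ++ t).count c) (pre.count c)
            (((PySem.List.enumerate t (pre.length : Int)).filter (fun p => p.2 == c)).map (·.1)) := by
  intro t
  induction t with
  | nil =>
    intro pre
    simp [PySem.List.enumerate_nil]
    rfl
  | cons a t ih =>
    intro pre
    rw [PySem.List.enumerate_cons, List.filter_cons]
    have hseq : (pre ++ [a]) ++ t = pre ++ a :: t := by simp
    have hpre1 : ((pre.length : Int) + 1) = (((pre ++ [a]).length : Nat) : Int) := by
      push_cast [List.length_append, List.length_singleton]
      ring
    by_cases hac : a = c
    · subst hac
      have hcond : ((((pre.length : Int), a)).2 == a) = true := by simp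
      rw [hcond]
      simp only [if_true]
      have hemit : pvEmit (pre ++ a :: t) ((pre.length : Int), a)
          = (if 2 * pre.count a + 1 < (pre ++ a :: t).count a then some (pvB_next a)
             else if (pre ++ a :: t).count a = 2 * pre.count a + 1 then some a else none) := by
        simp only [pvEmit, Int.toNat_natCast, List.take_left]
      have hcnt' : (pre ++ [a]).count a = pre.count a + 1 := by
        simp [List.count_append]
      have hih := ih (pre ++ [a])
      rw [hseq, hcnt'] at hih
      rw [List.map_cons, pvSelFrom]
      by_cases h1 : 2 * pre.count a + 1 < (pre ++ a :: t).count a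
      · have hf : pvF (pre ++ a :: t) ((pre.length : Int), a)
            = some ((pre.length : Int), pvB_next a) := by
          rw [pvF, hemit, if_pos h1]
          rfl
        rw [List.filterMap_cons_some hf, if_pos h1, hpre1, hih]
        simp
      · by_cases h2 : (pre ++ a :: t).count a = 2 * pre.count a + 1
        · have hf : pvF (pre ++ a :: t) ((pre.length : Int), a)
              = some ((pre.length : Int), a) := by
            rw [pvF, hemit, if_neg h1, if_pos h2]
            rfl
          rw [List.filterMap_cons_some hf, if_neg h1, if_pos h2, hpre1, hih]
          simp
        · have hf : pvF (pre ++ a :: t) ((pre.length : Int), a) = none := by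
            rw [pvF, hemit, if_neg h1, if_neg h2]
            rfl
          rw [List.filterMap_cons_none hf, if_neg h1, if_neg h2, hpre1, hih]
          simp
    · have hcond : ((((pre.length : Int), a)).2 == c) = false := by simp [hac]
      rw [hcond]
      simp only [Bool.false_eq_true, if_false]
      have hcnt' : (pre ++ [a]).count c = pre.count c := by
        simp [List.count_append, hac]
      have hih := ih (pre ++ [a])
      rw [hseq, hcnt'] at hih
      rw [hpre1, hih]

lemma posList_length (s : List Char) (c : Char) :
    (pvPosList s c).length = s.count c := by
  rw [pvPosList, List.length_map, ← List.countP_eq_length_filter]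
  conv_rhs => rw [← PySem.List.map_snd_enumerate s 0]
  rw [List.count, List.countP_map]
  rfl

-- group-by is a permutation
lemma perm_groupBy :
    ∀ (C : List Char) (L : List (Int × Char)), C.Nodup → (∀ p ∈ L, p.2 ∈ C) →
      L.Perm (C.flatMap (fun c => L.filter (fun p => p.2 == c))) := by
  intro C
  induction C with
  | nil =>
    intro L _ hL
    cases L with
    | nil => simp
    | cons p l => exact absurd (hL p (by simp)) (by simp)
  | cons c C ih =>
    intro L hnd hL
    rw [List.flatMap_cons]
    refine (List.filter_append_perm (fun p => p.2 == c) L).symm.trans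
      (List.Perm.append_left _ ?_)
    have hL' : ∀ p ∈ L.filter (fun p => !(p.2 == c)), p.2 ∈ C := by
      intro p hp
      have hm := List.mem_filter.mp hp
      have h1 := hL p hm.1
      have h2 : ¬ p.2 = c := by simpa using hm.2
      simpa [h2] using h1
    refine (ih (L.filter (fun p => !(p.2 == c))) hnd.of_cons hL').trans ?_
    have hcC : c ∉ C := (List.nodup_cons.mp hnd).1
    have heq : C.flatMap (fun c' => (L.filter (fun p => !(p.2 == c))).filter (fun p => p.2 == c'))
        = C.flatMap (fun c' => L.filter (fun p => p.2 == c')) := by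
      apply List.flatMap_congr
      intro c' hc'
      have hne : c' ≠ c := fun e => hcC (e ▸ hc')
      rw [List.filter_filter]
      apply List.filter_congr
      intro p _
      by_cases hp : p.2 = c'
      · simp [hp, hne]
      · simp [hp]
    exact heq ▸ List.Perm.refl _


lemma pvF_fst (s : List Char) (p : Int × Char) (x : Int × Char) (h : pvF s p = some x) :
    x.1 = p.1 := by
  simp only [pvF, Option.map_eq_some_iff] at h
  obtain ⟨ch, _, rfl⟩ := h
  rfl

lemma specKept_pairwise (s : List Char) :
    (pvSpecKept s).Pairwise (fun a b => a.1 < b.1) := by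
  refine List.Pairwise.filterMap (pvF s) ?_ (PySem.List.pairwise_lt_enumerate s 0)
  intro p q hpq x hx y hy
  rw [pvF_fst s p x hx, pvF_fst s q y hy]
  exact hpq

lemma kept_eq_flatMap (s : List Char) :
    (pvB_positions s).items.foldl pvB_keptStep [] =
      (PySem.Set.ofList s).flatMap (fun c => pvSelFrom c (s.count c) 0 (pvPosList s c)) := by
  rw [pos_items]
  have hstep : pvB_keptStep = fun acc p => acc ++ pvSelRaw p := by
    funext acc p
    simp [pvB_keptStep, pvSelRaw, List.append_assoc]
  rw [hstep, PySem.List.foldl_append_eq_flatMap, List.nil_append, List.flatMap_map]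
  apply List.flatMap_congr
  intro c _
  show pvSelRaw (c, pvPosList s c) = _
  rw [selRaw_eq_selFrom, posList_length]

lemma specKept_perm_kept (s : List Char) :
    (pvSpecKept s).Perm ((pvB_positions s).items.foldl pvB_keptStep []) := by
  rw [kept_eq_flatMap]
  have hmem : ∀ p ∈ PySem.List.enumerate s 0, p.2 ∈ PySem.Set.ofList s := by
    intro p hp
    rw [PySem.Set.mem_ofList]
    obtain ⟨k, hk, rfl⟩ := (PySem.List.mem_enumerate_iff s 0 p).mp hp
    exact List.getElem_mem hk
  have h2 := (perm_groupBy (PySem.Set.ofList s) (PySem.List.enumerate s 0)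
    (PySem.Set.nodup_ofList s) hmem).filterMap (pvF s)
  have h3 : ((PySem.Set.ofList s).flatMap
        (fun c => (PySem.List.enumerate s 0).filter (fun p => p.2 == c))).filterMap (pvF s)
      = (PySem.Set.ofList s).flatMap (fun c => pvSelFrom c (s.count c) 0 (pvPosList s c)) := by
    rw [List.filterMap_flatMap]
    apply List.flatMap_congr
    intro c _
    have h := filter_filterMap_eq_selFrom c s []
    simpa [pvPosList] using h
  exact h2.trans (h3 ▸ List.Perm.refl _)

-- ---- the passes agree ----

lemma pass_eq (s : List Char) : pvA_pass s = pvB_pass s := by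
  have hA : pvA_pass s = String.ofList ((PySem.List.enumerate s 0).filterMap (pvEmit s)) := by
    have h0 : ∀ c, (pvA_countDict s).getD c 0 =
        max ((pvA_countDict s).getD c 0 - 2 * (PySem.Dict.empty : PySem.Dict Char Int).getD c 0) 0 := by
      intro c
      rw [countDict_getD]
      simp
    have h1 := pass_fold_eq (pvA_countDict s) s (pvA_countDict s) PySem.Dict.empty [] h0
    have h2 := thresh_eq_filterMap s s [] PySem.Dict.empty [] rfl (by intro c; simp)
    rw [pvA_pass, show ("" : String) = String.ofList [] from rfl, h1, h2]
    simp
  have hB : pvB_pass s = String.ofList ((PySem.List.enumerate s 0).filterMap (pvEmit s)) := by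
    rw [pvB_pass]
    have hsort : PySem.List.sorted ((pvB_positions s).items.foldl pvB_keptStep [])
        (fun t => t.1) false = pvSpecKept s :=
      PySem.List.sorted_eq_of_perm_of_pairwise_lt _ _ (fun t => t.1)
        (specKept_perm_kept s) (specKept_pairwise s)
    simp only [hsort]
    rw [pvSpecKept, List.map_filterMap]
    congr 1
    apply List.filterMap_congr
    intro p _
    simp [pvF, Option.map_map]
  rw [hA, hB]

lemma loop_eq : ∀ (f : Nat) (cur : String), pvA_loop f cur = pvB_loop f cur := by
  intro f
  induction f with
  | zero => intro cur; rfl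
  | succ f ih =>
    intro cur
    simp only [pvA_loop, pvB_loop, pass_eq]
    split <;> [rfl; exact ih _]

-- ===== VERDICT (by name: the statement is the Claim_ definition above) =====
theorem last_survivors_spec : Claim_equal_last_survivors := by
  intro string _
  unfold Spec_last_survivors last_survivors last_survivors_alt
  exact loop_eq _ _
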